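-- pv_equiv track=rewrite | github.com/DaniilIljin/Python---basics | MX/mx_pyramid/pyramid.py | join_pyramids
-- ===== SOURCE A (Python) =====
-- def join_pyramids(pyramid_a: list, pyramid_b: list) -> list:
--     """
--     Join together two pyramid lists.
--
--     Get 2 pyramid lists as inputs. Join them together horizontally. If the the pyramid heights are not equal, add empty lines on the top until they are equal.
--     join_pyramids(make_pyramid(3, "A"), make_pyramid(6, 'a')) ->
--     [
--         [' ', ' ', ' ', ' ', ' ', 'a', 'a', ' ', ' '],
--         [' ', 'A', ' ', ' ', 'a', 'a', 'a', 'a', ' '],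
--         ['A', 'A', 'A', 'a', 'a', 'a', 'a', 'a', 'a']
--     ]
--
--     :param pyramid_a: list
--     :param pyramid_b: list
--     :return: list
--     """
--     connected_pyramids = []
--     layers_of_space = []
--     if pyramid_b == pyramid_a == []:
--         return []
--     elif len(pyramid_a) == len(pyramid_b):
--         connected_pyramids = [pyramid_a[layer_index] + pyramid_b[layer_index] for layer_index in range(len(pyramid_a))]
--         return connected_pyramids
--     else:
--         if len(pyramid_a) < len(pyramid_b):
--             for i in range(len(pyramid_a[0])):
--                 layers_of_space.append(' ')
--             for index, layer in enumerate(pyramid_b):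
--                 new_index = -(index + 1)
--                 if -new_index <= len(pyramid_a):
--                     new_layer = pyramid_a[new_index] + pyramid_b[new_index]
--                     connected_pyramids.insert(0, new_layer)
--                 else:
--                     new_layer = layers_of_space + pyramid_b[new_index]
--                     connected_pyramids.insert(0, new_layer)
--         else:
--             for i in range(len(pyramid_b[0])):
--                 layers_of_space.append(' ')
--             for index, layer in enumerate(pyramid_a):
--                 new_index = -(index + 1)
--                 if -new_index <= len(pyramid_b):
--                     new_layer = pyramid_a[new_index] + pyramid_b[new_index]
--                     connected_pyramids.insert(0, new_layer)
--                 else: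
--                     new_layer = pyramid_a[new_index] + layers_of_space
--                     connected_pyramids.insert(0, new_layer)
--         return connected_pyramids
-- ===== SOURCE B (Python) =====
-- def join_pyramids(pyramid_a: list, pyramid_b: list) -> list:
--     ha, hb = len(pyramid_a), len(pyramid_b)
--     if ha == 0 and hb == 0:
--         return []
--     if ha < hb:
--         pyramid_a = [[' '] * len(pyramid_a[0])] * (hb - ha) + pyramid_a
--     elif hb < ha:
--         pyramid_b = [[' '] * len(pyramid_b[0])] * (ha - hb) + pyramid_b
--     return [row_a + row_b for row_a, row_b in zip(pyramid_a, pyramid_b)]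
-- ===== Notes on version B (the rewrite author's own statement) =====
-- stated objective: simpler
-- what changed: B prepends the needed space rows to the shorter pyramid once and then zips the two lists row-wise, replacing A's three-way branch with its bottom-up enumerate loop, negative indexing and insert(0, ...).
import Mathlib
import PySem

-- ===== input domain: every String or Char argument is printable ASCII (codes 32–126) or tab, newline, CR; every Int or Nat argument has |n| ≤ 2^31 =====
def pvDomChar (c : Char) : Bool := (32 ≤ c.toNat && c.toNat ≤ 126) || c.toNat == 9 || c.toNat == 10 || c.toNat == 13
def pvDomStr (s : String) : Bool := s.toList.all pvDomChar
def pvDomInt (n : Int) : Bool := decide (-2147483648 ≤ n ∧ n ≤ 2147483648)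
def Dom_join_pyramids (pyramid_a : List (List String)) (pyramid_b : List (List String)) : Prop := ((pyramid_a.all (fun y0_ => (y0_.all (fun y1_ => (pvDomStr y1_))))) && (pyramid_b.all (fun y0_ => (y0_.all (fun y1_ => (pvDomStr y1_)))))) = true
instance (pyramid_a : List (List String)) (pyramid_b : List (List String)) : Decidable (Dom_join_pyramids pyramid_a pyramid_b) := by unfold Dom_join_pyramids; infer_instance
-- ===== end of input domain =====

-- B pads the shorter pyramid with space rows once and zips row-wise, instead of A's
-- three-way branch with a bottom-up enumerate loop, negative indices and insert(0, ...): simpler.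


-- ===== PORT A =====
def join_pyramids (pyramid_a : List (List String)) (pyramid_b : List (List String)) : List (List String) :=
  if pyramid_b = pyramid_a ∧ pyramid_a = [] then []
  else if pyramid_a.length = pyramid_b.length then
    -- [pyramid_a[i] + pyramid_b[i] for i in range(len(pyramid_a))]
    (PySem.List.pyRange 0 (pyramid_a.length : Int) 1).map
      (fun i => (PySem.List.pyGet? pyramid_a i).getD [] ++ (PySem.List.pyGet? pyramid_b i).getD [])
  else if pyramid_a.length < pyramid_b.length then
    -- for i in range(len(pyramid_a[0])): layers_of_space.append(' ')   (a[0]: IndexError when a = [], excluded by Pre_)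
    let layers_of_space : List String :=
      (PySem.List.pyRange 0 (((PySem.List.pyGet? pyramid_a 0).getD []).length : Int) 1).foldl
        (fun acc _ => acc ++ [" "]) []
    -- for index, layer in enumerate(pyramid_b): … connected.insert(0, new_layer)
    (PySem.List.enumerate pyramid_b 0).foldl
      (fun acc p =>
        (if p.1 + 1 ≤ (pyramid_a.length : Int) then
          (PySem.List.pyGet? pyramid_a (-(p.1 + 1))).getD [] ++ (PySem.List.pyGet? pyramid_b (-(p.1 + 1))).getD []
        else layers_of_space ++ (PySem.List.pyGet? pyramid_b (-(p.1 + 1))).getD []) :: acc) []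
  else
    let layers_of_space : List String :=
      (PySem.List.pyRange 0 (((PySem.List.pyGet? pyramid_b 0).getD []).length : Int) 1).foldl
        (fun acc _ => acc ++ [" "]) []
    (PySem.List.enumerate pyramid_a 0).foldl
      (fun acc p =>
        (if p.1 + 1 ≤ (pyramid_b.length : Int) then
          (PySem.List.pyGet? pyramid_a (-(p.1 + 1))).getD [] ++ (PySem.List.pyGet? pyramid_b (-(p.1 + 1))).getD []
        else (PySem.List.pyGet? pyramid_a (-(p.1 + 1))).getD [] ++ layers_of_space) :: acc) []

-- ===== PORT B =====
def join_pyramids_alt (pyramid_a : List (List String)) (pyramid_b : List (List String)) : List (List String) :=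
  let ha := pyramid_a.length
  let hb := pyramid_b.length
  if ha = 0 ∧ hb = 0 then []
  else
    -- pyramid_a[0] / pyramid_b[0] is only read on the padded (nonempty under Pre_) side
    let pa := if ha < hb then List.replicate (hb - ha) (List.replicate (pyramid_a.headD []).length " ") ++ pyramid_a else pyramid_a
    let pb := if hb < ha then List.replicate (ha - hb) (List.replicate (pyramid_b.headD []).length " ") ++ pyramid_b else pyramid_b
    List.zipWith (· ++ ·) pa pb

-- ===== PRECONDITION & SPEC =====
-- Pre_ excludes exactly the inputs where one pyramid is empty and the other is not:
-- there Python A raises IndexError on pyramid_x[0] (and B raises the same way).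
def Pre_join_pyramids (pyramid_a : List (List String)) (pyramid_b : List (List String)) : Prop :=
  (pyramid_a = [] ↔ pyramid_b = [])
instance (pyramid_a : List (List String)) (pyramid_b : List (List String)) : Decidable (Pre_join_pyramids pyramid_a pyramid_b) := by unfold Pre_join_pyramids; infer_instance

def pvWitness_join_pyramids : List (List String) × List (List String) :=
  ([["A"]], [[" ", "b", " "], ["b", "b", "b"]])

def Spec_join_pyramids (pyramid_a : List (List String)) (pyramid_b : List (List String)) (out : List (List String)) : Prop := out = join_pyramids_alt pyramid_a pyramid_b
instance (pyramid_a : List (List String)) (pyramid_b : List (List String)) (out : List (List String)) : Decidable (Spec_join_pyramids pyramid_a pyramid_b out) := by unfold Spec_join_pyramids; infer_instance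

-- ===== CLAIM (what is proved, stated in full; the proofs are below) =====
def Claim_equal_join_pyramids : Prop := ∀ (pyramid_a : List (List String)) (pyramid_b : List (List String)), Dom_join_pyramids pyramid_a pyramid_b → Pre_join_pyramids pyramid_a pyramid_b → Spec_join_pyramids pyramid_a pyramid_b (join_pyramids pyramid_a pyramid_b)

-- ===== LEMMAS AND PROOFS =====

-- A's prepend-accumulator loop builds the reversed map of the traversed list.
lemma pv_foldl_cons_rev {α β : Type} (xs : List α) (f : α → β) (acc : List β) :
    xs.foldl (fun acc x => f x :: acc) acc = (xs.map f).reverse ++ acc := by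
  induction xs generalizing acc with
  | nil => simp
  | cons x xs ih => simp [ih]

-- A's space-row loop is a replicate.
lemma pv_getD {α : Type} (l : List α) (i : Nat) (h : i < l.length) (d : α) :
    l[i]?.getD d = l[i] := by
  rw [List.getElem?_eq_getElem h]; rfl

lemma pv_spaces (w : Nat) :
    (PySem.List.pyRange 0 (w : Int) 1).foldl (fun acc _ => acc ++ [" "]) ([] : List String)
      = List.replicate w " " := by
  rw [PySem.List.foldl_append_singleton_eq_map (fun _ : Int => " ") (PySem.List.pyRange 0 (w : Int) 1) [],
     List.map_const']
  simp [PySem.List.length_pyRange_one]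

-- ===== VERDICT (by name: the statement is the Claim_ definition above) =====
theorem join_pyramids_spec : Claim_equal_join_pyramids := by
  intro a b _ hpre
  unfold Pre_join_pyramids at hpre
  unfold Spec_join_pyramids
  by_cases ha0 : a = []
  · have hb0 : b = [] := hpre.mp ha0
    subst ha0 hb0
    simp [join_pyramids, join_pyramids_alt]
  · have hb0 : b ≠ [] := fun h => ha0 (hpre.mpr h)
    have ham : 0 < a.length := List.length_pos_iff.mpr ha0
    have hbm : 0 < b.length := List.length_pos_iff.mpr hb0
    rcases Nat.lt_trichotomy a.length b.length with hlt | heq | hgt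
    · -- a shorter: A takes the a<b branch
      simp only [join_pyramids, join_pyramids_alt, pv_spaces,
        PySem.List.pyGet?_zero]
      rw [if_neg (by simp [ha0]), if_neg (by omega), if_pos hlt,
        if_neg (by omega), if_pos hlt, if_neg (by omega)]
      simp only [pv_foldl_cons_rev, List.append_nil]
      apply List.ext_getElem
      · simp [PySem.List.length_enumerate]; omega
      · intro j h1 h2
        simp only [List.getElem_reverse, List.getElem_map, PySem.List.getElem_enumerate,
          List.length_map, PySem.List.length_enumerate, List.getElem_zipWith]
        have hj : j < b.length := by simp [PySem.List.length_enumerate] at h1; omega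
        have e : (0 + ((b.length - 1 - j : Nat) : Int) + 1) = ((b.length - j : Nat) : Int) := by omega
        rw [e, PySem.List.pyGet?_neg_natCast b (b.length - j) (by omega) (by omega)]
        have eb : b.length - (b.length - j) = j := by omega
        rw [eb]
        by_cases hc : b.length - a.length ≤ j
        · rw [if_pos (by omega), PySem.List.pyGet?_neg_natCast a (b.length - j) (by omega) (by omega),
            List.getElem_append_right (by simp; omega), pv_getD _ _ (by omega), pv_getD _ _ hj]
          simp only [List.length_replicate]
          simp only [show a.length - (b.length - j) = j - (b.length - a.length) from by omega]
        · rw [if_neg (by omega), List.getElem_append_left (by simp; omega), List.getElem_replicate,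
            pv_getD _ _ hj]
          have h0 : a[0]?.getD [] = a.headD [] := by
            cases a with
            | nil => simp
            | cons x xs => simp
          rw [h0]
    · -- equal heights
      simp only [join_pyramids, join_pyramids_alt]
      rw [if_neg (by simp [ha0]), if_pos heq, if_neg (by omega), if_neg (by omega), if_neg (by omega)]
      apply List.ext_getElem
      · simp [PySem.List.length_pyRange_one]; omega
      · intro j h1 h2
        have hj : j < a.length := by simp [PySem.List.length_pyRange_one] at h1; omega
        simp only [List.getElem_map, PySem.List.getElem_pyRange_one, List.getElem_zipWith,
          zero_add, PySem.List.pyGet?_natCast]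
        rw [pv_getD _ _ hj, pv_getD _ _ (by omega)]
    · -- b shorter
      simp only [join_pyramids, join_pyramids_alt, pv_spaces,
        PySem.List.pyGet?_zero]
      rw [if_neg (by simp [ha0]), if_neg (by omega), if_neg (by omega),
        if_neg (by omega), if_neg (by omega), if_pos hgt]
      simp only [pv_foldl_cons_rev, List.append_nil]
      apply List.ext_getElem
      · simp [PySem.List.length_enumerate]; omega
      · intro j h1 h2
        simp only [List.getElem_reverse, List.getElem_map, PySem.List.getElem_enumerate,
          List.length_map, PySem.List.length_enumerate, List.getElem_zipWith]
        have hj : j < a.length := by simp [PySem.List.length_enumerate] at h1; omega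
        have e : (0 + ((a.length - 1 - j : Nat) : Int) + 1) = ((a.length - j : Nat) : Int) := by omega
        rw [e, PySem.List.pyGet?_neg_natCast a (a.length - j) (by omega) (by omega)]
        rw [show a.length - (a.length - j) = j from by omega]
        by_cases hc : a.length - b.length ≤ j
        · rw [if_pos (by omega), PySem.List.pyGet?_neg_natCast b (a.length - j) (by omega) (by omega),
            List.getElem_append_right (by simp; omega), pv_getD _ _ hj, pv_getD _ _ (by omega)]
          simp only [List.length_replicate,
            show b.length - (a.length - j) = j - (a.length - b.length) from by omega]
        · rw [if_neg (by omega), List.getElem_append_left (by simp; omega), List.getElem_replicate,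
            pv_getD _ _ hj]
          have h0 : b[0]?.getD [] = b.headD [] := by
            cases b with
            | nil => simp
            | cons x xs => simp
          rw [h0]
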